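-- pv_equiv track=rewrite | github.com/bystrovmaxim/aoa | src/action_machine/logging/channel.py | channel_mask_label
-- ===== SOURCE A (Python) =====
-- from enum import IntFlag
--
-- class Channel(IntFlag):
--     """
--     Semantic log channel bitmask (debug, business, security, compliance, error).
--
--     AI-CORE-BEGIN
--     ROLE: Topic classifier for log routing/filtering.
--     CONTRACT: Compose topics with bitwise OR and test via bitwise AND.
--     INVARIANTS: Only declared enum bits are legal for validated masks.
--     AI-CORE-END
--     """
--
--     debug = 1
--     business = 2
--     security = 4
--     compliance = 8
--     error = 16
--
-- _CHANNEL_LABEL_ORDER: tuple[Channel, ...] = (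
--     Channel.debug,
--     Channel.business,
--     Channel.security,
--     Channel.compliance,
--     Channel.error,
-- )
--
-- def channel_mask_label(mask: Channel) -> str:
--     """
--     Comma-separated channel member names for a bitmask, e.g. ``"debug, business"``.
--
--     Call after ``validate_channels`` (or on any mask with only defined bits).
--     """
--     v = int(mask)
--     return ", ".join(
--         name
--         for c in _CHANNEL_LABEL_ORDER
--         if (v & int(c)) != 0
--         for name in (c.name,)
--         if name is not None
--     )
-- ===== SOURCE B (Python) =====
-- # Precompute all 32 possible labels once by power-set doubling, then answer
-- # every call with a single O(1) table lookup on mask mod 32.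
-- _LABELS = [""]
-- for _name in ("debug", "business", "security", "compliance", "error"):
--     _LABELS += [(_t + ", " + _name) if _t else _name for _t in _LABELS]
--
--
-- def channel_mask_label(mask):
--     return _LABELS[int(mask) % 32]
-- ===== Notes on version B (the rewrite author's own statement) =====
-- stated objective: alternative
-- what changed: B replaces the per-call scan over the label table with a 32-entry lookup table built once by power-set doubling (each member doubles the table, appending itself to every existing label); a call is a single indexing by mask mod 32.
import Mathlib
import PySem

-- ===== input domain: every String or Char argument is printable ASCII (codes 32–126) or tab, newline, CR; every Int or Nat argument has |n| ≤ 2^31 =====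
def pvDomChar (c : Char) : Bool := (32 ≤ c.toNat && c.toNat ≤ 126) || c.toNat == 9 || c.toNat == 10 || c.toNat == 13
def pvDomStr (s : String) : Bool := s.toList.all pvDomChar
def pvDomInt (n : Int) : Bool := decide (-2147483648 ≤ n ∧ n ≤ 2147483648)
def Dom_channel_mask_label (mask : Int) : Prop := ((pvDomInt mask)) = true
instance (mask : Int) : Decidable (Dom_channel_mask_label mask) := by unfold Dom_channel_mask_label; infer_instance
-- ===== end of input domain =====

-- B precomputes all 32 labels once by power-set doubling and answers each call
-- with one table lookup on mask mod 32; objective: alternative algorithm, O(1) per call.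

-- ===== PORT A =====
-- _CHANNEL_LABEL_ORDER with each member's value and name
def pvChannelLabelOrder : List (Int × String) :=
  [(1, "debug"), (2, "business"), (4, "security"), (8, "compliance"), (16, "error")]

def channel_mask_label (mask : Int) : String :=
  let v : Int := mask
  String.intercalate ", "
    ((pvChannelLabelOrder.filter (fun c => PySem.Int.band v c.1 ≠ 0)).map (fun c => c.2))

-- ===== PORT B =====
-- the module-level _LABELS table, built by the same power-set doubling loop
def pvChanTable : List String :=
  (["debug", "business", "security", "compliance", "error"]).foldl
    (fun acc name => acc ++ acc.map (fun t => if t = "" then name else t ++ ", " ++ name))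
    [""]

-- _LABELS[int(mask) % 32]; the index is always in range (0 ≤ mod < 32), so the
-- Python indexing never raises and getD's default is never used.
def channel_mask_label_alt (mask : Int) : String :=
  pvChanTable.getD (PySem.Int.mod mask 32).toNat ""

-- ===== PRECONDITION & SPEC =====
def Spec_channel_mask_label (mask : Int) (out : String) : Prop := out = channel_mask_label_alt mask
instance (mask : Int) (out : String) : Decidable (Spec_channel_mask_label mask out) := by unfold Spec_channel_mask_label; infer_instance

-- ===== CLAIM (what is proved, stated in full; the proofs are below) =====
def Claim_equal_channel_mask_label : Prop := ∀ (mask : Int), Dom_channel_mask_label mask → Spec_channel_mask_label mask (channel_mask_label mask)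

-- ===== LEMMAS AND PROOFS =====

-- Bit i of n (i < 5) seen through Nat &&& equals bit i of n mod 32.
theorem pv_natkey (n i : Nat) (hi : i < 5) : (n &&& 2^i ≠ 0) ↔ n % 32 / 2^i % 2 = 1 := by
  have h1 : (n &&& 2^i ≠ 0) ↔ n.testBit i = true := by
    rw [Nat.and_two_pow]
    cases h : n.testBit i
    · simp
    · simp only [Bool.toNat_true, one_mul, ne_eq, iff_true]
      positivity
  have h2 : (n % 32).testBit i = n.testBit i := by
    have h32 : (32:Nat) = 2^5 := by norm_num
    rw [h32, Nat.testBit_mod_two_pow]; simp [hi]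
  rw [h1, ← h2, Nat.testBit_eq_decide_div_mod_eq]; simp

-- A's bit test against the single-bit value 2^i, for i < 5, only sees bit i of
-- mask mod 32 (Python semantics: band is infinite two's complement, % 32 ≥ 0).
theorem pv_band_two_pow_ne (m : Int) (i : Nat) (hi : i < 5) :
    (PySem.Int.band m (2 ^ i) ≠ 0) ↔ ((m % 32) / 2 ^ i) % 2 = 1 := by
  have h2 : ((2:Int) ^ i) = ((2 ^ i : Nat) : Int) := by push_cast; ring
  rcases le_or_gt 0 m with hm | hm
  · obtain ⟨n, rfl⟩ := Int.eq_ofNat_of_zero_le hm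
    rw [h2, PySem.Int.band_natCast]
    have hc : ((n:Int) % 32) / ((2^i : Nat) : Int) % 2 = ((n % 32 / 2^i % 2 : Nat) : Int) := by
      push_cast; ring_nf
    rw [hc]
    constructor
    · intro h
      exact_mod_cast (pv_natkey n i hi).1 (by exact_mod_cast h)
    · intro h
      exact_mod_cast fun hz => ((pv_natkey n i hi).2 (by exact_mod_cast h)) (by exact_mod_cast hz)
  · have hn0 : 0 ≤ -m - 1 := by omega
    obtain ⟨n, hn⟩ := Int.eq_ofNat_of_zero_le hn0
    have hb : PySem.Int.band m (2^i) = ((2^i - (2^i &&& n) : Nat) : Int) := by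
      rw [PySem.Int.band]
      rw [if_neg (by omega), if_pos (by positivity)]
      have e1 : ((2:Int)^i).toNat = 2^i := by rw [h2, Int.toNat_natCast]
      have e2 : (-m - 1).toNat = n := by omega
      rw [e1, e2]
    have hm32 : m % 32 = 31 - ((n % 32 : Nat) : Int) := by omega
    have hlt : n % 32 < 32 := Nat.mod_lt _ (by norm_num)
    have hkey := pv_natkey n i hi
    have htb : n &&& 2^i = (n.testBit i).toNat * 2^i := Nat.and_two_pow n i
    rw [hb, hm32, Nat.and_comm, htb]
    generalize hr : n % 32 = r at hkey hlt
    rw [htb] at hkey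
    cases h : n.testBit i <;> rw [h] at hkey
    · simp only [Bool.toNat_false, zero_mul, Nat.sub_zero]
      have hp : ((2^i:Nat):Int) ≠ 0 := by positivity
      simp only [ne_eq, hp, not_false_eq_true, true_iff]
      have hk2 : ¬ (r / 2^i % 2 = 1) := by
        intro hc
        simp only [hc, iff_true] at hkey
        simp at hkey
      interval_cases i <;> omega
    · simp only [Bool.toNat_true, one_mul, Nat.sub_self, Nat.cast_zero, ne_eq,
        not_true_eq_false, false_iff]
      have hk2 : r / 2^i % 2 = 1 := by
        refine hkey.mp ?_
        have : (0:Nat) < 2^i := by positivity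
        simp only [Bool.toNat_true, one_mul]
        omega
      interval_cases i <;> omega

theorem pv_ports_agree (m : Int) : channel_mask_label m = channel_mask_label_alt m := by
  have e1 : (PySem.Int.band m 1 ≠ 0) ↔ m % 32 % 2 = 1 := by
    have h := pv_band_two_pow_ne m 0 (by norm_num)
    rw [pow_zero, Int.ediv_one] at h; exact h
  have e2 : (PySem.Int.band m 2 ≠ 0) ↔ (m % 32) / 2 % 2 = 1 := by
    have h := pv_band_two_pow_ne m 1 (by norm_num); norm_num at h; exact h
  have e4 : (PySem.Int.band m 4 ≠ 0) ↔ (m % 32) / 4 % 2 = 1 := by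
    have h := pv_band_two_pow_ne m 2 (by norm_num); norm_num at h; exact h
  have e8 : (PySem.Int.band m 8 ≠ 0) ↔ (m % 32) / 8 % 2 = 1 := by
    have h := pv_band_two_pow_ne m 3 (by norm_num); norm_num at h; exact h
  have e16 : (PySem.Int.band m 16 ≠ 0) ↔ (m % 32) / 16 % 2 = 1 := by
    have h := pv_band_two_pow_ne m 4 (by norm_num); norm_num at h; exact h
  have hr0 : 0 ≤ m % 32 := Int.emod_nonneg m (by norm_num)
  have hr32 : m % 32 < 32 := Int.emod_lt_of_pos m (by norm_num)
  have hM : PySem.Int.mod m 32 = m % 32 := by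
    simp [PySem.Int.mod, Int.fmod_eq_emod]
  simp only [channel_mask_label, channel_mask_label_alt, pvChannelLabelOrder,
    hM, List.filter_cons, List.filter_nil, decide_eq_true_eq]
  simp only [e1, e2, e4, e8, e16]
  generalize hgen : m % 32 = r at hr0 hr32 ⊢
  interval_cases r <;> decide

-- ===== VERDICT (by name: the statement is the Claim_ definition above) =====
theorem channel_mask_label_spec : Claim_equal_channel_mask_label := by
  intro m _
  unfold Spec_channel_mask_label
  exact pv_ports_agree m
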